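-- pv_equiv track=rewrite | github.com/fruitBohl/NumberTheory | src/thesis/swapping_sums.py | sum_phi_diff2
-- ===== SOURCE A (Python) =====
-- from math import cos, sqrt, pi, comb, ceil, floor, prod, gcd
--
-- def isPrime(n):
--     if n < 2:
--         return False
--     for i in range(2, n + 1):
--         if i * i <= n and n % i == 0:
--             return False
--     return True
--
-- def mobius(N):
--     if N == 1:
--         return 1
--
--     p = 0
--     for i in range(1, N + 1):
--         if N % i == 0 and isPrime(i):
--             if N % (i * i) == 0:
--                 return 0
--             else:
--                 # i occurs only once,
--                 # increase f
--                 p = p + 1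
--
--     if p % 2 != 0:
--         return -1
--     else:
--         return 1
--
-- def sum_phi_diff2(n: int) -> int:
--     """Euler phi function in summation notation"""
--
--     phi_sum = sum(
--         [
--             mobius(m) * sum(d for d in [i for i in range(1, floor(n / m)+1)])
--             for m in range(1, n + 1)
--         ]
--     )
--
--     return int(phi_sum)
-- ===== SOURCE B (Python) =====
-- def _mu(n):
--     """Mobius of n >= 1 by trial division, dividing out each prime factor."""
--     cnt = 0
--     d = 2
--     while d * d <= n:
--         if n % d == 0:
--             n //= d
--             if n % d == 0:
--                 return 0
--             cnt += 1
--         d += 1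
--     if n > 1:
--         cnt += 1
--     return 1 if cnt % 2 == 0 else -1
--
-- def sum_phi_diff2(n: int) -> int:
--     total = 0
--     for m in range(1, n + 1):
--         mu = _mu(m)
--         if mu:
--             k = n // m
--             total += mu * (k * (k + 1) // 2)
--     return total
-- ===== Notes on version B (the rewrite author's own statement) =====
-- stated objective: faster
-- what changed: Per-term Moebius is computed by trial-division factorisation (dividing out each found prime, bailing out on a square) instead of A's scan of all i in 1..m with an O(i) primality test each, and the inner sum 1+...+k is replaced by the closed form k*(k+1)//2.
import Mathlib
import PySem

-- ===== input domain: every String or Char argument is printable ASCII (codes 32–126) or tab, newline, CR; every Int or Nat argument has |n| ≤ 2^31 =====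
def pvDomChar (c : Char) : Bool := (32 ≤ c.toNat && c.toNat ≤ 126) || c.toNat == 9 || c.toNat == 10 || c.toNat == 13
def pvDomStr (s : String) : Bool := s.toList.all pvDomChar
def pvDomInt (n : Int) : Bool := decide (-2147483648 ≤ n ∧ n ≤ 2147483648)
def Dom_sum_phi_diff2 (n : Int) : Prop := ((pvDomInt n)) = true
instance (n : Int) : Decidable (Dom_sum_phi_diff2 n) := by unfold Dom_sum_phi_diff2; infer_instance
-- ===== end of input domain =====

/- B replaces A's O(n²)-per-call Möbius (trial isPrime scan over 1..N) by a single trial-division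
   factorisation per m and the inner list-sum by the closed form k(k+1)//2; objective: faster. -/


-- ===== PORT A =====
-- helper isPrime: the loop `for i in range(2, n+1): if i*i <= n and n % i == 0: return False`
def isPrimeLoop (n : Int) : List Int → Bool
  | [] => true
  | i :: rest => if i * i ≤ n ∧ PySem.Int.mod n i = 0 then false else isPrimeLoop n rest

def isPrime (n : Int) : Bool :=
  if n < 2 then false else isPrimeLoop n (PySem.List.pyRange 2 (n + 1) 1)

-- helper mobius: the loop over i in range(1, N+1) with early `return 0`, accumulator p
def mobiusLoop (N : Int) : List Int → Int → Int
  | [], p => if ¬ PySem.Int.mod p 2 = 0 then -1 else 1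
  | i :: rest, p =>
    if PySem.Int.mod N i = 0 ∧ isPrime i = true then
      (if PySem.Int.mod N (i * i) = 0 then 0 else mobiusLoop N rest (p + 1))
    else mobiusLoop N rest p

def mobius (N : Int) : Int :=
  if N = 1 then 1 else mobiusLoop N (PySem.List.pyRange 1 (N + 1) 1) 0

-- floor(n / m) in A is float division then floor; on this domain (|n| ≤ 2^31 < 2^52, 1 ≤ m ≤ n)
-- it is exact and equals n // m, ported as PySem.Int.floordiv.
def sum_phi_diff2 (n : Int) : Int :=
  ((PySem.List.pyRange 1 (n + 1) 1).map (fun m =>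
      mobius m *
        ((PySem.List.pyRange 1 (PySem.Int.floordiv n m + 1) 1).foldl (· + ·) 0))).foldl (· + ·) 0

-- ===== PORT B =====
-- the `while d * d <= n` trial-division loop of Source B's _mu; structural recursion on the fuel
-- (n + 2 - d).toNat, which is 0 only when the guard d*d <= n is already false, so the 0-case is
-- the loop-exit branch and muLoop computes exactly what the Python while loop computes.
def muLoopF : Nat → Int → Int → Int → Int
  | f + 1, n, d, cnt =>
    if d * d ≤ n then
      if PySem.Int.mod n d = 0 then
        let n' := PySem.Int.floordiv n d
        if PySem.Int.mod n' d = 0 then 0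
        else muLoopF f n' (d + 1) (cnt + 1)
      else muLoopF f n (d + 1) cnt
    else
      let cnt' := if n > 1 then cnt + 1 else cnt
      (if PySem.Int.mod cnt' 2 = 0 then 1 else -1)
  | 0, n, _, cnt =>
      let cnt' := if n > 1 then cnt + 1 else cnt
      (if PySem.Int.mod cnt' 2 = 0 then 1 else -1)

def muLoop (n d cnt : Int) : Int := muLoopF (n + 2 - d).toNat n d cnt

def sum_phi_diff2_alt (n : Int) : Int :=
  (PySem.List.pyRange 1 (n + 1) 1).foldl
    (fun total m =>
      let mu := muLoop m 2 0
      if mu ≠ 0 then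
        let k := PySem.Int.floordiv n m
        total + mu * PySem.Int.floordiv (k * (k + 1)) 2
      else total) 0

-- ===== PRECONDITION & SPEC =====
def Spec_sum_phi_diff2 (n : Int) (out : Int) : Prop := out = sum_phi_diff2_alt n
instance (n : Int) (out : Int) : Decidable (Spec_sum_phi_diff2 n out) := by unfold Spec_sum_phi_diff2; infer_instance

-- ===== CLAIM (what is proved, stated in full; the proofs are below) =====
def Claim_equal_sum_phi_diff2 : Prop := ∀ (n : Int), Dom_sum_phi_diff2 n → Spec_sum_phi_diff2 n (sum_phi_diff2 n)

-- ===== LEMMAS AND PROOFS =====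

theorem gauss_sum (k : Int) (hk : 0 ≤ k) :
    (PySem.List.pyRange 1 (k + 1) 1).foldl (· + ·) 0 = PySem.Int.floordiv (k * (k + 1)) 2 := by
  obtain ⟨m, rfl⟩ : ∃ m : ℕ, k = (m : Int) := ⟨k.toNat, (Int.toNat_of_nonneg hk).symm⟩
  clear hk
  induction m with
  | zero => simp [PySem.List.pyRange_one_eq_nil, PySem.Int.floordiv]
  | succ m ih =>
    have h1 : ((m + 1 : ℕ) : Int) + 1 = ((m : Int) + 1) + 1 := by push_cast; ring
    rw [h1, PySem.List.pyRange_one_succ_right (by omega), List.foldl_append, ih]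
    obtain ⟨c, hc⟩ : ∃ c, (m : Int) * ((m : Int) + 1) = 2 * c := by
      rcases Int.even_mul_succ_self (m : Int) with ⟨c, hc⟩
      exact ⟨c, by omega⟩
    have h2 : ((m : Int) + 1) * ((m : Int) + 1 + 1) = 2 * (c + (m + 1)) := by
      push_cast; nlinarith [hc]
    have h3 : ((m + 1 : ℕ) : Int) * ((m:Int) + 1 + 1) = 2 * (c + ((m:Int) + 1)) := by
      push_cast at h2 ⊢; linarith
    rw [hc, h3, PySem.Int.floordiv_eq_ediv_of_pos (by norm_num),
        PySem.Int.floordiv_eq_ediv_of_pos (by norm_num),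
        Int.mul_ediv_cancel_left _ (by norm_num), Int.mul_ediv_cancel_left _ (by norm_num)]
    simp

theorem isPrimeLoop_true_iff (n : Int) (L : List Int) :
    isPrimeLoop n L = true ↔ ∀ i ∈ L, ¬(i * i ≤ n ∧ PySem.Int.mod n i = 0) := by
  induction L with
  | nil => simp [isPrimeLoop]
  | cons i rest ih =>
    by_cases h : i * i ≤ n ∧ PySem.Int.mod n i = 0
    · simp [isPrimeLoop, h]
    · simp [isPrimeLoop, h, ih]; tauto

theorem isPrime_iff (j : ℕ) : isPrime (j : Int) = true ↔ j.Prime := by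
  unfold isPrime
  by_cases hj : j < 2
  · simp [show ((j:Int) < 2) by exact_mod_cast hj]
    intro hp; exact absurd hp.two_le (by omega)
  · have hj2 : 2 ≤ j := by omega
    rw [if_neg (by push_cast; omega), isPrimeLoop_true_iff]
    constructor
    · intro h
      rw [Nat.prime_def_le_sqrt]
      refine ⟨hj2, fun m hm hms hdvd => ?_⟩
      have hmm : m * m ≤ j := Nat.le_sqrt.mp hms
      have hmem : (m : Int) ∈ PySem.List.pyRange 2 ((j:Int) + 1) 1 := by
        rw [PySem.List.mem_pyRange_one]
        constructor
        · exact_mod_cast hm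
        · have : m ≤ j := le_trans (Nat.le_mul_of_pos_left m (by omega)) hmm
          push_cast; omega
      exact h _ hmem ⟨by exact_mod_cast hmm, by
        rw [PySem.Int.mod_eq_zero_iff_dvd]; exact_mod_cast hdvd⟩
    · intro hp i hi ⟨hii, hmod⟩
      rw [PySem.List.mem_pyRange_one] at hi
      obtain ⟨t, rfl⟩ : ∃ t : ℕ, i = (t : Int) := ⟨i.toNat, (Int.toNat_of_nonneg (by omega)).symm⟩
      have ht2 : 2 ≤ t := by exact_mod_cast hi.1
      have htt : t * t ≤ j := by exact_mod_cast hii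
      have htdvd : t ∣ j := by
        rw [PySem.Int.mod_eq_zero_iff_dvd] at hmod; exact_mod_cast hmod
      rw [Nat.prime_def_le_sqrt] at hp
      exact hp.2 t ht2 (by rw [Nat.le_sqrt]; exact htt) htdvd

def muSpec (k : ℕ) : Int := if Squarefree k then (-1) ^ k.primeFactors.card else 0

theorem parity_pow (c : ℕ) :
    (if PySem.Int.mod (c : Int) 2 = 0 then (1 : Int) else -1) = (-1) ^ c := by
  rw [PySem.Int.mod_eq_emod_of_pos (by norm_num),
      show ((c:Int) % 2) = ((c % 2 : ℕ) : Int) by push_cast; rfl]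
  rcases Nat.even_or_odd c with hc | hc
  · rw [if_pos (by exact_mod_cast Nat.even_iff.mp hc), hc.neg_one_pow]
  · rw [if_neg (by rw [Nat.odd_iff.mp hc]; norm_num), hc.neg_one_pow]

theorem mobiusLoop_eq_zero (N : Int) (L : List Int) (p : Int)
    (h : ∃ i ∈ L, PySem.Int.mod N i = 0 ∧ isPrime i = true ∧ PySem.Int.mod N (i * i) = 0) :
    mobiusLoop N L p = 0 := by
  induction L generalizing p with
  | nil => simp at h
  | cons i rest ih =>
    rcases h with ⟨w, hw, h1, h2, h3⟩
    rcases List.mem_cons.mp hw with rfl | hw'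
    · simp [mobiusLoop, h1, h2, h3]
    · by_cases hc : PySem.Int.mod N i = 0 ∧ isPrime i = true
      · by_cases hs : PySem.Int.mod N (i * i) = 0
        · simp [mobiusLoop, hc, hs]
        · simpa [mobiusLoop, hc, hs] using ih _ ⟨w, hw', h1, h2, h3⟩
      · simpa [mobiusLoop, hc] using ih _ ⟨w, hw', h1, h2, h3⟩

theorem mobiusLoop_count (N : Int) (L : List Int) (p : Int)
    (h : ∀ i ∈ L, ¬(PySem.Int.mod N i = 0 ∧ isPrime i = true ∧ PySem.Int.mod N (i * i) = 0)) :
    mobiusLoop N L p =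
      (if ¬ PySem.Int.mod (p + (L.countP (fun i => decide (PySem.Int.mod N i = 0) && isPrime i) : ℕ)) 2 = 0
       then -1 else 1) := by
  induction L generalizing p with
  | nil => simp [mobiusLoop]
  | cons i rest ih =>
    by_cases hc : PySem.Int.mod N i = 0 ∧ isPrime i = true
    · have hs : ¬ PySem.Int.mod N (i * i) = 0 := fun hs => h i (by simp) ⟨hc.1, hc.2, hs⟩
      rw [show mobiusLoop N (i :: rest) p = mobiusLoop N rest (p + 1) by
            simp [mobiusLoop, hc, hs],
          ih _ (fun x hx => h x (by simp [hx]))]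
      have : (List.countP (fun i => decide (PySem.Int.mod N i = 0) && isPrime i) (i :: rest) : ℕ)
           = List.countP (fun i => decide (PySem.Int.mod N i = 0) && isPrime i) rest + 1 := by
        rw [List.countP_cons]; simp [hc.1, hc.2]
      rw [this]
      congr 1
      push_cast; ring_nf
    · rw [show mobiusLoop N (i :: rest) p = mobiusLoop N rest p by simp [mobiusLoop, hc],
          ih _ (fun x hx => h x (by simp [hx]))]
      have : (List.countP (fun i => decide (PySem.Int.mod N i = 0) && isPrime i) (i :: rest) : ℕ)
           = List.countP (fun i => decide (PySem.Int.mod N i = 0) && isPrime i) rest := by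
        rw [List.countP_cons]
        have : ¬(decide (PySem.Int.mod N i = 0) && isPrime i = true) := by
          intro hb; simp at hb; exact hc ⟨hb.1, hb.2⟩
        simp at this ⊢
        tauto
      rw [this]

theorem count_eq_card (N : ℕ) (hN : 1 ≤ N) :
    (PySem.List.pyRange 1 ((N : Int) + 1) 1).countP
        (fun i => decide (PySem.Int.mod (N : Int) i = 0) && isPrime i)
      = N.primeFactors.card := by
  -- turn the Int range into List.range (N+1) over ℕ
  have h1 : (PySem.List.pyRange 1 ((N : Int) + 1) 1) = (List.range N).map (fun k : ℕ => 1 + (k : Int)) := by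
    apply List.ext_getElem
    · simp [PySem.List.length_pyRange_one]
    · intro i h1 h2
      simp [PySem.List.getElem_pyRange_one]
  rw [h1, List.countP_map]
  have h2 : ∀ k : ℕ,
      ((fun i => decide (PySem.Int.mod (N : Int) i = 0) && isPrime i) ∘ (fun k : ℕ => 1 + (k : Int))) k
      = decide ((k + 1) ∣ N ∧ (k + 1).Prime) := by
    intro k
    have hc : (1 + (k : Int)) = ((k + 1 : ℕ) : Int) := by push_cast; ring
    have e0 : decide (PySem.Int.mod (N : Int) ((k + 1 : ℕ) : Int) = 0) = decide ((k + 1) ∣ N) := by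
      rw [decide_eq_decide, PySem.Int.mod_eq_zero_iff_dvd]
      exact Int.natCast_dvd_natCast
    have e2 : isPrime ((k + 1 : ℕ) : Int) = decide ((k + 1).Prime) := by
      by_cases hp : (k + 1).Prime
      · rw [(isPrime_iff (k+1)).mpr hp, decide_eq_true hp]
      · rw [decide_eq_false hp]
        exact Bool.eq_false_iff.mpr (fun h => hp ((isPrime_iff _).mp h))
    simp only [Function.comp, hc, e0, e2]
    exact (Bool.decide_and _ _).symm
  have h2' : List.countP ((fun i => decide (PySem.Int.mod (N : Int) i = 0) && isPrime i) ∘ (fun k : ℕ => 1 + (k : Int))) (List.range N)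
      = List.countP (fun k => decide ((k + 1) ∣ N ∧ (k + 1).Prime)) (List.range N) :=
    List.countP_congr (fun x _ => by rw [h2 x])
  rw [h2']
  -- now a pure ℕ statement
  have h3 : (List.range N).countP (fun k => decide ((k + 1) ∣ N ∧ (k + 1).Prime))
      = (List.range (N + 1)).countP (fun k => decide (k ∣ N ∧ k.Prime)) := by
    rw [List.range_succ_eq_map, List.countP_cons, List.countP_map]
    simp [Nat.not_prime_zero]
    exact List.countP_congr (fun x _ => by simp [Nat.add_comm 1 x])
  rw [h3, List.countP_eq_length_filter]
  have h4 : (List.filter (fun k => decide (k ∣ N ∧ k.Prime)) (List.range (N + 1))).toFinset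
      = N.primeFactors := by
    ext p
    simp [List.mem_filter, Nat.mem_primeFactors]
    constructor
    · rintro ⟨_, hd, hp⟩; exact ⟨hp, hd, by omega⟩
    · rintro ⟨hp, hd, _⟩
      exact ⟨Nat.le_of_dvd (by omega) hd, hd, hp⟩
  rw [← h4, List.toFinset_card_of_nodup ((List.nodup_range).filter _)]

theorem mobius_eq_muSpec (k : ℕ) (hk : 1 ≤ k) : mobius (k : Int) = muSpec k := by
  by_cases hk1 : k = 1
  · subst hk1
    simp [mobius, muSpec, squarefree_one]
  have hk2 : 2 ≤ k := by omega
  rw [mobius, if_neg (by exact_mod_cast (show k ≠ 1 from hk1))]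
  by_cases hsq : Squarefree k
  · rw [mobiusLoop_count]
    · rw [count_eq_card k hk]
      have h0 : (0 : Int) + (k.primeFactors.card : Int) = (k.primeFactors.card : Int) := by ring
      rw [h0, muSpec, if_pos hsq, ← parity_pow]
      by_cases hpar : PySem.Int.mod (k.primeFactors.card : Int) 2 = 0
      · rw [if_neg (not_not_intro hpar), if_pos hpar]
      · rw [if_pos hpar, if_neg hpar]
    · rintro i hi ⟨h1, h2, h3⟩
      rw [PySem.List.mem_pyRange_one] at hi
      obtain ⟨t, rfl⟩ : ∃ t : ℕ, i = (t : Int) := ⟨i.toNat, (Int.toNat_of_nonneg (by omega)).symm⟩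
      have ht : t.Prime := (isPrime_iff t).mp h2
      have hdvd : t * t ∣ k := by
        rw [PySem.Int.mod_eq_zero_iff_dvd] at h3
        exact_mod_cast h3
      exact (Nat.squarefree_iff_prime_squarefree.mp hsq) t ht hdvd
  · obtain ⟨p, hp, hpd⟩ : ∃ p : ℕ, p.Prime ∧ p * p ∣ k := by
      by_contra h
      push_neg at h
      exact hsq (Nat.squarefree_iff_prime_squarefree.mpr (fun p hp => h p hp))
    rw [muSpec, if_neg hsq]
    apply mobiusLoop_eq_zero
    refine ⟨(p : Int), ?_, ?_, ?_, ?_⟩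
    · rw [PySem.List.mem_pyRange_one]
      have hdk : p ∣ k := dvd_trans (dvd_mul_right p p) hpd
      have hle : p ≤ k := Nat.le_of_dvd (by omega) hdk
      have hp2 : 2 ≤ p := hp.two_le
      constructor <;> omega
    · rw [PySem.Int.mod_eq_zero_iff_dvd]
      exact_mod_cast dvd_trans (dvd_mul_right p p) hpd
    · exact (isPrime_iff p).mpr hp
    · rw [PySem.Int.mod_eq_zero_iff_dvd]
      exact_mod_cast hpd

-- card of primeFactors of P*q for a new prime q not dividing P
theorem card_primeFactors_mul_prime (P q : ℕ) (hP : 0 < P) (hq : q.Prime) (hnd : ¬ q ∣ P) :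
    (P * q).primeFactors.card = P.primeFactors.card + 1 := by
  rw [Nat.primeFactors_mul (by omega) hq.ne_zero, hq.primeFactors]
  rw [Finset.card_union_of_disjoint (by
    simp [Finset.disjoint_singleton_right, Nat.mem_primeFactors]
    intro _ h; exact absurd h hnd)]
  simp

theorem muLoop_exit (m d cnt N P : ℕ)
    (hd : 2 ≤ d) (hm : 1 ≤ m) (hP : 0 < P)
    (hPsq : Squarefree P) (hN : N = P * m) (hcnt : cnt = P.primeFactors.card)
    (hPlt : ∀ p : ℕ, p.Prime → p ∣ P → p < d)
    (hmge : ∀ p : ℕ, p.Prime → p ∣ m → d ≤ p)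
    (hguard : m < d * d) :
    (if PySem.Int.mod (if (m : Int) > 1 then (cnt : Int) + 1 else (cnt : Int)) 2 = 0
     then (1 : Int) else -1) = muSpec N := by
  by_cases hm1 : m = 1
  · subst hm1 hN hcnt
    have h1 : (if ((1:ℕ):Int) > 1 then (P.primeFactors.card : Int) + 1 else (P.primeFactors.card : Int)) = (P.primeFactors.card : Int) := by norm_num
    rw [h1, parity_pow, muSpec, if_pos (by simpa using hPsq)]
    simp
  · -- m is prime
    have hm2 : 2 ≤ m := by omega
    have hmp : m.Prime := by
      by_contra hnp
      have h1 : m.minFac * m.minFac ≤ m := by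
        have := Nat.minFac_sq_le_self (by omega) hnp
        simpa [pow_two] using this
      have h2 : d ≤ m.minFac := hmge _ (Nat.minFac_prime hm1) (Nat.minFac_dvd m)
      have : d * d ≤ m.minFac * m.minFac := Nat.mul_le_mul h2 h2
      omega
    have hnd : ¬ m ∣ P := fun hdvd => absurd (hPlt m hmp hdvd) (by have := hmge m hmp dvd_rfl; omega)
    have hco : Nat.Coprime m P := (Nat.Prime.coprime_iff_not_dvd hmp).mpr hnd
    have hsq : Squarefree N := by
      rw [hN, Nat.squarefree_mul hco.symm]
      exact ⟨hPsq, hmp.squarefree⟩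
    have hcard : N.primeFactors.card = cnt + 1 := by
      rw [hN, hcnt]; exact card_primeFactors_mul_prime P m hP hmp hnd
    have h1 : (if ((m:ℕ):Int) > 1 then (cnt:Int) + 1 else (cnt:Int)) = ((cnt + 1 : ℕ) : Int) := by
      rw [if_pos (by exact_mod_cast hm2)]; push_cast; ring
    rw [h1, parity_pow, muSpec, if_pos hsq, hcard]

theorem muLoopF_spec : ∀ (f : ℕ) (m d cnt N P : ℕ),
    ((m : Int) + 2 - d).toNat ≤ f →
    2 ≤ d → 1 ≤ m → 0 < P →
    Squarefree P → N = P * m → cnt = P.primeFactors.card →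
    (∀ p : ℕ, p.Prime → p ∣ P → p < d) →
    (∀ p : ℕ, p.Prime → p ∣ m → d ≤ p) →
    muLoopF f (m : Int) (d : Int) (cnt : Int) = muSpec N := by
  intro f
  induction f with
  | zero =>
    intro m d cnt N P hf hd hm hP hPsq hN hcnt hPlt hmge
    have hguard : m < d * d := by
      have : m + 2 ≤ d := by omega
      nlinarith
    simpa only [muLoopF] using muLoop_exit m d cnt N P hd hm hP hPsq hN hcnt hPlt hmge hguard
  | succ f ih =>
    intro m d cnt N P hf hd hm hP hPsq hN hcnt hPlt hmge
    rw [muLoopF]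
    by_cases hguard : (d : Int) * d ≤ m
    · rw [if_pos hguard]
      have hguardN : d * d ≤ m := by exact_mod_cast hguard
      have hdm : d ≤ m := le_trans (Nat.le_mul_of_pos_left d (by omega)) hguardN
      rw [PySem.Int.mod_natCast]
      by_cases hdvd : d ∣ m
      · rw [if_pos (by exact_mod_cast Nat.mod_eq_zero_of_dvd hdvd)]
        have hdp : d.Prime := by
          have h1 := Nat.minFac_prime (show d ≠ 1 by omega)
          have h2 : d.minFac ∣ m := dvd_trans (Nat.minFac_dvd d) hdvd
          have h3 : d ≤ d.minFac := hmge _ h1 h2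
          have h4 : d.minFac ≤ d := Nat.minFac_le (by omega)
          have h5 : d.minFac = d := le_antisymm h4 h3
          rw [← h5]; exact h1
        show (if PySem.Int.mod (PySem.Int.floordiv ((m:ℕ):Int) ((d:ℕ):Int)) ((d:ℕ):Int) = 0 then (0:Int)
              else muLoopF f (PySem.Int.floordiv ((m:ℕ):Int) ((d:ℕ):Int)) (((d:ℕ):Int)+1) (((cnt:ℕ):Int)+1)) = muSpec N
        rw [PySem.Int.floordiv_natCast, PySem.Int.mod_natCast]
        by_cases hdd : d ∣ (m / d)
        · rw [if_pos (by exact_mod_cast Nat.mod_eq_zero_of_dvd hdd)]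
          have hsqN : ¬ Squarefree N := by
            intro hs
            have hddm : d * d ∣ m := by
              obtain ⟨e, he⟩ := hdd
              exact ⟨e, by rw [mul_assoc, ← he, Nat.mul_div_cancel' hdvd]⟩
            exact (Nat.squarefree_iff_prime_squarefree.mp hs) d hdp
              (dvd_trans hddm (hN ▸ dvd_mul_left m P))
          rw [muSpec, if_neg hsqN]
        · rw [if_neg (by
            intro h
            exact hdd (Nat.dvd_of_mod_eq_zero (by exact_mod_cast h)))]
          have hndP : ¬ d ∣ P := fun h => lt_irrefl d (hPlt d hdp h)
          have hco : Nat.Coprime d P := (hdp.coprime_iff_not_dvd).mpr hndP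
          have hlt : m / d < m := Nat.div_lt_self (by omega) (by omega)
          rw [show ((d : Int) + 1) = ((d + 1 : ℕ) : Int) by push_cast; ring,
              show ((cnt : Int) + 1) = ((cnt + 1 : ℕ) : Int) by push_cast; ring]
          apply ih (m / d) (d + 1) (cnt + 1) N (P * d) ?_ (by omega)
            ((Nat.one_le_div_iff (by omega)).mpr hdm) (Nat.mul_pos hP (by omega))
          · rw [Nat.squarefree_mul hco.symm]; exact ⟨hPsq, hdp.squarefree⟩
          · rw [hN, mul_assoc, Nat.mul_div_cancel' hdvd]
          · rw [card_primeFactors_mul_prime P d hP hdp hndP]; omega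
          · intro p hp hpd
            rcases (Nat.Prime.dvd_mul hp).mp hpd with h | h
            · exact lt_trans (hPlt p hp h) (by omega)
            · rw [(Nat.prime_dvd_prime_iff_eq hp hdp).mp h]; omega
          · intro p hp hpd
            have hpm : p ∣ m := dvd_trans hpd (Nat.div_dvd_of_dvd hdvd)
            have := hmge p hp hpm
            have hne : p ≠ d := fun he => hdd (he ▸ hpd)
            omega
          · omega
      · rw [if_neg (by
          intro h
          exact hdvd (Nat.dvd_of_mod_eq_zero (by exact_mod_cast h))),
          show ((d : Int) + 1) = ((d + 1 : ℕ) : Int) by push_cast; ring]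
        apply ih m (d + 1) cnt N P ?_ (by omega) hm hP hPsq hN hcnt
        · intro p hp hpd; exact lt_trans (hPlt p hp hpd) (by omega)
        · intro p hp hpd
          have := hmge p hp hpd
          rcases Nat.lt_or_ge d p with h | h
          · omega
          · have : p = d := by omega
            subst this; exact absurd hpd hdvd
        · omega
    · rw [if_neg hguard]
      have hg : ¬ (d * d ≤ m) := by exact_mod_cast hguard
      exact muLoop_exit m d cnt N P hd hm hP hPsq hN hcnt hPlt hmge (by omega)

theorem muLoop_eq_muSpec (k : ℕ) (hk : 1 ≤ k) : muLoop (k : Int) 2 0 = muSpec k := by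
  have h := muLoopF_spec (((k : Int) + 2 - 2).toNat) k 2 0 k 1
    (by push_cast; omega) (by omega) hk one_pos squarefree_one (by ring) (by simp)
    (fun p hp hpd => by have := Nat.dvd_one.mp hpd; omega)
    (fun p hp _ => hp.two_le)
  rw [muLoop]
  exact_mod_cast h

theorem fold_eq (n : Int) (hn : 0 < n) :
    ∀ (L : List Int) (t : Int), (∀ m ∈ L, 1 ≤ m) →
    ((L.map (fun m => mobius m *
        ((PySem.List.pyRange 1 (PySem.Int.floordiv n m + 1) 1).foldl (· + ·) 0))).foldl (· + ·) t)
    = L.foldl (fun total m =>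
        let mu := muLoop m 2 0
        if mu ≠ 0 then
          let k := PySem.Int.floordiv n m
          total + mu * PySem.Int.floordiv (k * (k + 1)) 2
        else total) t := by
  intro L
  induction L with
  | nil => intro t _; rfl
  | cons m L ih =>
    intro t hL
    have hm : 1 ≤ m := hL m (by simp)
    obtain ⟨j, rfl⟩ : ∃ j : ℕ, m = (j : Int) := ⟨m.toNat, (Int.toNat_of_nonneg (by omega)).symm⟩
    have hj : 1 ≤ j := by exact_mod_cast hm
    have hmu : muLoop (j : Int) 2 0 = mobius (j : Int) := by
      rw [muLoop_eq_muSpec j hj, mobius_eq_muSpec j hj]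
    have hk0 : 0 ≤ PySem.Int.floordiv n (j : Int) := by
      rw [PySem.Int.floordiv_eq_ediv_of_pos (by exact_mod_cast hj)]
      exact Int.ediv_nonneg (le_of_lt hn) (by exact_mod_cast Nat.zero_le j)
    have hg := gauss_sum (PySem.Int.floordiv n (j : Int)) hk0
    simp only [List.map_cons, List.foldl_cons]
    rw [ih _ (fun x hx => hL x (by simp [hx]))]
    congr 1
    show t + mobius (j : Int) * _ = _
    by_cases hz : muLoop (j : Int) 2 0 ≠ 0
    · simp only [if_pos hz]
      rw [hg, hmu]
    · simp only [if_neg hz]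
      push_neg at hz
      rw [hmu] at hz
      rw [hz, zero_mul, add_zero]

theorem main_eq (n : Int) : sum_phi_diff2 n = sum_phi_diff2_alt n := by
  rw [sum_phi_diff2, sum_phi_diff2_alt]
  by_cases hn : n ≤ 0
  · rw [PySem.List.pyRange_one_eq_nil (by omega)]; rfl
  · exact fold_eq n (by omega) _ 0 (fun m hm => ((PySem.List.mem_pyRange_one).mp hm).1)

-- ===== VERDICT (by name: the statement is the Claim_ definition above) =====
theorem sum_phi_diff2_spec : Claim_equal_sum_phi_diff2 := by
  intro n _
  unfold Spec_sum_phi_diff2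
  exact main_eq n
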